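-- pv_equiv track=rewrite | github.com/Batxent/red-crawler | src/red_crawler/crawl/similar.py | expand_recommendation_graph
-- ===== SOURCE A (Python) =====
-- from collections import deque
-- from typing import Dict, List
--
-- def expand_recommendation_graph(
--     seed_account_id: str,
--     graph: Dict[str, List[str]],
--     max_accounts: int,
--     max_depth: int,
-- ) -> List[str]:
--     visited = []
--     seen = {seed_account_id}
--     queue = deque([(seed_account_id, 0)])
--
--     while queue and len(visited) < max_accounts:
--         account_id, depth = queue.popleft()
--         visited.append(account_id)
--         if depth >= max_depth:
--             continue
--         for neighbor in graph.get(account_id, []):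
--             if neighbor in seen:
--                 continue
--             seen.add(neighbor)
--             queue.append((neighbor, depth + 1))
--     return visited
-- ===== SOURCE B (Python) =====
-- def expand_recommendation_graph(seed_account_id, graph, max_accounts, max_depth):
--     visited = []
--     seen = {seed_account_id}
--     frontier = [seed_account_id]
--     depth = 0
--     while frontier and len(visited) < max_accounts:
--         next_frontier = []
--         for node in frontier:
--             if len(visited) >= max_accounts:
--                 break
--             visited.append(node)
--             if depth < max_depth:
--                 for nb in graph.get(node, []):
--                     if nb not in seen:
--                         seen.add(nb)
--                         next_frontier.append(nb)
--         frontier = next_frontier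
--         depth += 1
--     return visited
-- ===== Notes on version B (the rewrite author's own statement) =====
-- stated objective: alternative
-- what changed: Replaces A's single deque of (node, depth) pairs by a level-by-level BFS: an explicit frontier list per depth with a next-frontier accumulator and an integer depth counter, so no per-node depth tags are stored.
import Mathlib
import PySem

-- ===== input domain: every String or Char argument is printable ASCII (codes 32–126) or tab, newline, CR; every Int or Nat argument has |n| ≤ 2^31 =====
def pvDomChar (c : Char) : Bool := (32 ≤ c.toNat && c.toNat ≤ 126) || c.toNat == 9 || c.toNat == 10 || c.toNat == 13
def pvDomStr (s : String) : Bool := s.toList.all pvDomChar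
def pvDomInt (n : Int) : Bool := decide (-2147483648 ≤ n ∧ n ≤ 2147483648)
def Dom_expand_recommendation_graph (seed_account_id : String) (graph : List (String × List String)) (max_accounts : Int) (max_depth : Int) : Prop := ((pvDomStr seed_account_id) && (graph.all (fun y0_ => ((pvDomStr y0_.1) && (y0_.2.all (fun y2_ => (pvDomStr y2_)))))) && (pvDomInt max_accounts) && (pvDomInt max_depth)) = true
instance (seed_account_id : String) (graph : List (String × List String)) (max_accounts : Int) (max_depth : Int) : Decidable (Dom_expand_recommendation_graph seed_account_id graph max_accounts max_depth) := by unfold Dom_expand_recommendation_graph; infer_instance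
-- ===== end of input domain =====

-- B replaces A's flat deque of (node, depth) pairs by a level-by-level BFS (explicit frontier
-- per depth); same return value, same O(V+E) cost (objective: alternative decomposition).

-- ===== PORT A =====
-- A-side helpers.  Both loop ports carry `base` (the list of all account ids that can ever be
-- marked seen) purely as a termination measure, plus a decidable totality guard
-- `seen.Nodup ∧ seen ⊆ base ∧ …` that is invariant (always true on every reachable state) —
-- it only makes the well-founded recursion go through and changes no computed value.

-- the inner `for neighbor in graph.get(account_id, []): …` loop of A (state: seen, queue)
def pvNbrLoopA (d : Int) (seen : PySem.Set String) (queue : List (String × Int)) :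
    List String → PySem.Set String × List (String × Int)
  | [] => (seen, queue)
  | nb :: rest =>
    if PySem.Set.contains seen nb then pvNbrLoopA d seen queue rest
    else pvNbrLoopA d (PySem.Set.add seen nb) (queue ++ [(nb, d + 1)]) rest

-- proof-side characterisation of what one neighbour scan appends (cited by `decreasing_by`)
def pvAddsOf (seen : List String) : List String → List String
  | [] => []
  | nb :: rest =>
    if PySem.Set.contains seen nb then pvAddsOf seen rest
    else nb :: pvAddsOf (seen ++ [nb]) rest

lemma pvNbrLoopA_eq (d : Int) (nbrs : List String) :
    ∀ (seen : List String) (q : List (String × Int)),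
    pvNbrLoopA d seen q nbrs
      = (seen ++ pvAddsOf seen nbrs, q ++ (pvAddsOf seen nbrs).map (fun n => (n, d + 1))) := by
  induction nbrs with
  | nil => intro seen q; simp [pvNbrLoopA, pvAddsOf]
  | cons nb rest ih =>
    intro seen q
    by_cases hm : nb ∈ seen
    · simp [pvNbrLoopA, pvAddsOf, PySem.Set.contains, List.contains_eq_mem, hm, ih]
    · simp [pvNbrLoopA, pvAddsOf, PySem.Set.contains, List.contains_eq_mem, PySem.Set.add, hm, ih,
        List.append_assoc]

lemma pvAddsOf_subset (nbrs : List String) :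
    ∀ seen : List String, pvAddsOf seen nbrs ⊆ nbrs := by
  induction nbrs with
  | nil => intro seen; simp [pvAddsOf]
  | cons nb rest ih =>
    intro seen
    by_cases hm : nb ∈ seen
    · simp only [pvAddsOf, PySem.Set.contains, List.contains_eq_mem, hm, decide_true, if_true]
      exact (ih seen).trans (List.subset_cons_self _ _)
    · simp only [pvAddsOf, PySem.Set.contains, List.contains_eq_mem, hm, decide_false, Bool.false_eq_true, if_false]
      exact List.cons_subset_cons nb (ih _)

lemma pvAddsOf_nodup (nbrs : List String) :
    ∀ seen : List String, seen.Nodup → (seen ++ pvAddsOf seen nbrs).Nodup := by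
  induction nbrs with
  | nil => intro seen h; simpa [pvAddsOf]
  | cons nb rest ih =>
    intro seen h
    by_cases hm : nb ∈ seen
    · simpa [pvAddsOf, PySem.Set.contains, List.contains_eq_mem, hm] using ih seen h
    · have h1 : (seen ++ [nb]).Nodup := by
        rw [List.nodup_append]
        refine ⟨h, List.nodup_singleton _, ?_⟩
        intro a ha b hb2
        have hbn : b = nb := by simpa using hb2
        subst hbn
        exact fun he => hm (he ▸ ha)
      have := ih (seen ++ [nb]) h1
      simpa [pvAddsOf, PySem.Set.contains, List.contains_eq_mem, hm, List.append_assoc] using this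

lemma pvNodupSubsetLen {α : Type} [DecidableEq α] (s b : List α)
    (h1 : s.Nodup) (h2 : s ⊆ b) : s.length ≤ b.length := by
  calc s.length = s.toFinset.card := (List.toFinset_card_of_nodup h1).symm
    _ ≤ b.toFinset.card := Finset.card_le_card (fun x hx => by
          simp only [List.mem_toFinset] at *; exact h2 hx)
    _ ≤ b.length := b.toFinset_card_le

lemma pvGetD_subset (l : List (String × List String)) (a x : String)
    (hx : x ∈ (PySem.Dict.mk l).getD a []) : x ∈ l.flatMap (fun p => p.2) := by
  induction l with
  | nil => simp [PySem.Dict.getD, PySem.Dict.get?] at hx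
  | cons p rest ih =>
    obtain ⟨k, v⟩ := p
    by_cases hk : (k == a) = true
    · simp only [PySem.Dict.getD, PySem.Dict.get?_mk_cons, hk, if_true, Option.getD_some] at hx
      simp [List.mem_flatMap]
      exact Or.inl hx
    · simp only [PySem.Dict.getD, PySem.Dict.get?_mk_cons, hk, Bool.false_eq_true, if_false] at hx
      have := ih hx
      simp only [List.flatMap_cons, List.mem_append]
      exact Or.inr this

-- the main `while queue and len(visited) < max_accounts:` loop of A
def pvLoopA (graph : List (String × List String)) (ma md : Int) (base : List String)
    (visited : List String) (seen : PySem.Set String) (queue : List (String × Int)) :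
    List String :=
  if hInv : seen.Nodup ∧ seen ⊆ base ∧ graph.flatMap (fun p => p.2) ⊆ base then
    match queue with
    | [] => visited
    | (a, d) :: qs =>
      if PySem.List.len visited < ma then
        if d ≥ md then pvLoopA graph ma md base (visited ++ [a]) seen qs
        else
          let st := pvNbrLoopA d seen qs ((PySem.Dict.mk graph).getD a [])
          pvLoopA graph ma md base (visited ++ [a]) st.1 st.2
      else visited
  else visited
termination_by 2 * (base.length + 1 - seen.length) + queue.length
decreasing_by
  · simp only [List.length_cons]; omega
  · rw [pvNbrLoopA_eq]
    have hsub : seen ++ pvAddsOf seen ((PySem.Dict.mk graph).getD a []) ⊆ base := by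
      intro x hx
      rcases List.mem_append.mp hx with h | h
      · exact hInv.2.1 h
      · exact hInv.2.2 (pvGetD_subset _ _ _ (pvAddsOf_subset _ _ h))
    have hnd := pvAddsOf_nodup ((PySem.Dict.mk graph).getD a []) seen hInv.1
    have hlen := pvNodupSubsetLen _ _ hnd hsub
    simp only [List.length_append, List.length_map, List.length_cons] at hlen ⊢
    omega

def expand_recommendation_graph (seed_account_id : String) (graph : List (String × List String)) (max_accounts : Int) (max_depth : Int) : List String :=
  pvLoopA graph max_accounts max_depth (seed_account_id :: graph.flatMap (fun p => p.2))
    [] (PySem.Set.ofList [seed_account_id]) [(seed_account_id, 0)]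

-- ===== PORT B =====
-- the inner `for nb in graph.get(node, []): …` loop of B (state: seen, next_frontier)
def pvNbrLoopB (seen : PySem.Set String) (next : List String) :
    List String → PySem.Set String × List String
  | [] => (seen, next)
  | nb :: rest =>
    if PySem.Set.contains seen nb then pvNbrLoopB seen next rest
    else pvNbrLoopB (PySem.Set.add seen nb) (next ++ [nb]) rest

lemma pvNbrLoopB_eq (nbrs : List String) :
    ∀ (seen next : List String),
    pvNbrLoopB seen next nbrs = (seen ++ pvAddsOf seen nbrs, next ++ pvAddsOf seen nbrs) := by
  induction nbrs with
  | nil => intro seen next; simp [pvNbrLoopB, pvAddsOf]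
  | cons nb rest ih =>
    intro seen next
    by_cases hm : nb ∈ seen
    · simp [pvNbrLoopB, pvAddsOf, PySem.Set.contains, List.contains_eq_mem, hm, ih]
    · simp [pvNbrLoopB, pvAddsOf, PySem.Set.contains, List.contains_eq_mem, PySem.Set.add, hm, ih,
        List.append_assoc]

-- the `for node in frontier: …` loop of B (with the mid-level break on max_accounts)
def pvInnerB (graph : List (String × List String)) (ma md : Int) (d : Int)
    (visited : List String) (seen : PySem.Set String) (next : List String) :
    List String → List String × PySem.Set String × List String
  | [] => (visited, seen, next)
  | x :: xs =>
    if PySem.List.len visited ≥ ma then (visited, seen, next)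
    else
      if d < md then
        let st := pvNbrLoopB seen next ((PySem.Dict.mk graph).getD x [])
        pvInnerB graph ma md d (visited ++ [x]) st.1 st.2 xs
      else pvInnerB graph ma md d (visited ++ [x]) seen next xs

-- what one level produces: visited grows by a prefix of the frontier, and seen and
-- next_frontier grow by the SAME freshly-seen list (cited by pvOuterB's `decreasing_by`)
lemma pvInnerB_spec (graph : List (String × List String)) (ma md d : Int) :
    ∀ (front visited seen next : List String), ∃ v2 adds : List String,
      pvInnerB graph ma md d visited seen next front = (visited ++ v2, seen ++ adds, next ++ adds)
      ∧ adds ⊆ graph.flatMap (fun p => p.2) ∧ (seen.Nodup → (seen ++ adds).Nodup) := by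
  intro front
  induction front with
  | nil => intro visited seen next; exact ⟨[], [], by simp [pvInnerB]⟩
  | cons x xs ih =>
    intro visited seen next
    by_cases hv : PySem.List.len visited ≥ ma
    · refine ⟨[], [], ?_, by simp, fun h0 => by simpa⟩
      simp only [pvInnerB]
      rw [if_pos hv]
      simp
    · by_cases hd : d < md
      · obtain ⟨v2, adds, heq, hsub, hnd⟩ :=
          ih (visited ++ [x]) (seen ++ pvAddsOf seen ((PySem.Dict.mk graph).getD x []))
             (next ++ pvAddsOf seen ((PySem.Dict.mk graph).getD x []))
        refine ⟨x :: v2, pvAddsOf seen ((PySem.Dict.mk graph).getD x []) ++ adds, ?_, ?_, ?_⟩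
        · simp only [pvInnerB, hv, if_false, hd, if_true]
          rw [pvNbrLoopB_eq]
          simpa [List.append_assoc] using heq
        · intro y hy
          rcases List.mem_append.mp hy with h | h
          · exact pvGetD_subset _ _ _ (pvAddsOf_subset _ _ h)
          · exact hsub h
        · intro h0
          have := hnd (pvAddsOf_nodup _ _ h0)
          simpa [List.append_assoc] using this
      · obtain ⟨v2, adds, heq, hsub, hnd⟩ := ih (visited ++ [x]) seen next
        refine ⟨x :: v2, adds, ?_, hsub, hnd⟩
        simp only [pvInnerB, hv, if_false, hd]
        simpa [List.append_assoc] using heq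

-- the outer `while frontier and len(visited) < max_accounts:` loop of B
def pvOuterB (graph : List (String × List String)) (ma md : Int) (base : List String)
    (visited : List String) (seen : PySem.Set String) (frontier : List String) (d : Int) :
    List String :=
  if hInv : seen.Nodup ∧ seen ⊆ base ∧ graph.flatMap (fun p => p.2) ⊆ base then
    if frontier ≠ [] ∧ PySem.List.len visited < ma then
      let st := pvInnerB graph ma md d visited seen [] frontier
      pvOuterB graph ma md base st.1 st.2.1 st.2.2 (d + 1)
    else visited
  else visited
termination_by 2 * (base.length + 1 - seen.length) + frontier.length
decreasing_by
  obtain ⟨v2, adds, heq, hsub, hnd⟩ := pvInnerB_spec graph ma md d frontier visited seen []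
  rw [heq]
  have hsub2 : seen ++ adds ⊆ base := by
    intro x hx
    rcases List.mem_append.mp hx with h | h
    · exact hInv.2.1 h
    · exact hInv.2.2 (hsub h)
  have hlen := pvNodupSubsetLen _ _ (hnd hInv.1) hsub2
  have hfr : frontier ≠ [] := by tauto
  have hfr' : 0 < frontier.length := List.length_pos_iff.mpr hfr
  simp only [List.length_append, List.nil_append] at hlen ⊢
  omega

def expand_recommendation_graph_alt (seed_account_id : String) (graph : List (String × List String)) (max_accounts : Int) (max_depth : Int) : List String :=
  pvOuterB graph max_accounts max_depth (seed_account_id :: graph.flatMap (fun p => p.2))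
    [] (PySem.Set.ofList [seed_account_id]) [seed_account_id] 0

-- ===== PRECONDITION & SPEC =====
def Spec_expand_recommendation_graph (seed_account_id : String) (graph : List (String × List String)) (max_accounts : Int) (max_depth : Int) (out : List String) : Prop := out = expand_recommendation_graph_alt seed_account_id graph max_accounts max_depth
instance (seed_account_id : String) (graph : List (String × List String)) (max_accounts : Int) (max_depth : Int) (out : List String) : Decidable (Spec_expand_recommendation_graph seed_account_id graph max_accounts max_depth out) := by unfold Spec_expand_recommendation_graph; infer_instance

-- ===== CLAIM (what is proved, stated in full; the proofs are below) =====
def Claim_equal_expand_recommendation_graph : Prop := ∀ (seed_account_id : String) (graph : List (String × List String)) (max_accounts : Int) (max_depth : Int), Dom_expand_recommendation_graph seed_account_id graph max_accounts max_depth → Spec_expand_recommendation_graph seed_account_id graph max_accounts max_depth (expand_recommendation_graph seed_account_id graph max_accounts max_depth)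

-- ===== LEMMAS AND PROOFS =====

-- Simulation: A's flat queue, when its contents are one (possibly partial) level at depth d
-- followed by the accumulating next level at depth d+1, computes exactly what B's inner loop
-- followed by B's outer loop computes.  Strong induction on an explicit Nat measure n.
-- Simulation: A's flat queue, when its contents are one (possibly partial) level at depth d
-- followed by the accumulating next level at depth d+1, computes exactly what B's inner loop
-- followed by B's outer loop computes.  Strong induction on an explicit Nat measure n.
lemma pvSim (graph : List (String × List String)) (ma md : Int) (base : List String)
    (hb : graph.flatMap (fun p => p.2) ⊆ base) :
    ∀ (n : Nat) (d : Int) (front1 front2 visited seen : List String),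
      seen.Nodup → seen ⊆ base →
      2 * (2 * (base.length + 1 - seen.length) + front1.length + front2.length)
        + (if front1 = [] then 1 else 0) ≤ n →
      pvLoopA graph ma md base visited seen
          (front1.map (fun x => (x, d)) ++ front2.map (fun x => (x, d + 1)))
        = pvOuterB graph ma md base
            (pvInnerB graph ma md d visited seen front2 front1).1
            (pvInnerB graph ma md d visited seen front2 front1).2.1
            (pvInnerB graph ma md d visited seen front2 front1).2.2 (d + 1) := by
  intro n
  induction n using Nat.strong_induction_on with
  | _ n ih =>
    intro d front1 front2 visited seen hnd hsub hn
    have hInv : seen.Nodup ∧ seen ⊆ base ∧ List.flatMap (fun p => p.2) graph ⊆ base :=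
      ⟨hnd, hsub, hb⟩
    match front1 with
    | [] =>
      simp only [pvInnerB, List.map_nil, List.nil_append]
      rw [pvOuterB, dif_pos hInv]
      by_cases hc : front2 ≠ [] ∧ PySem.List.len visited < ma
      · rw [if_pos hc]
        -- recurse: next level, front1 := front2, front2 := []
        have hmlt : 2 * (2 * (base.length + 1 - seen.length) + front2.length + 0)
            + (if front2 = [] then 1 else 0) < n := by
          have hf0 : (if front2 = ([] : List String) then (1 : Nat) else 0) = 0 := by
            simp [hc.1]
          have hn' : 2 * (2 * (base.length + 1 - seen.length) + 0 + front2.length) + 1 ≤ n := by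
            simpa using hn
          rw [hf0]
          omega
        have := ih _ hmlt (d + 1) front2 [] visited seen hnd hsub (le_refl _)
        simpa using this
      · rw [if_neg hc]
        match front2 with
        | [] =>
          rw [pvLoopA, dif_pos hInv]
          rfl
        | y :: ys =>
          have hv : ¬ PySem.List.len visited < ma := by tauto
          rw [pvLoopA, dif_pos hInv]
          exact if_neg hv
    | x :: xs =>
      simp only [List.map_cons, List.cons_append]
      rw [pvLoopA, dif_pos hInv]
      by_cases hv : PySem.List.len visited < ma
      · have hv' : ¬ PySem.List.len visited ≥ ma := not_le.mpr hv
        have hxs0 : (if (x :: xs : List String) = [] then (1 : Nat) else 0) = 0 := by simp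
        simp only [List.length_cons, hxs0] at hn
        by_cases hd : d < md
        · have hd' : ¬ d ≥ md := not_le.mpr hd
          simp only [pvInnerB, if_pos hv, if_neg hd', if_neg hv', if_pos hd]
          rw [pvNbrLoopA_eq, pvNbrLoopB_eq]
          set A := pvAddsOf seen ((PySem.Dict.mk graph).getD x []) with hA
          have hnd2 : (seen ++ A).Nodup := pvAddsOf_nodup _ _ hnd
          have hsub2 : seen ++ A ⊆ base := by
            intro y hy
            rcases List.mem_append.mp hy with h | h
            · exact hsub h
            · exact hb (pvGetD_subset _ _ _ (pvAddsOf_subset _ _ h))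
          have hmlt : 2 * (2 * (base.length + 1 - (seen ++ A).length) + xs.length
              + (front2 ++ A).length) + (if xs = [] then 1 else 0) < n := by
            have hlen := pvNodupSubsetLen _ _ hnd2 hsub2
            have h0 : (if xs = ([] : List String) then (1 : Nat) else 0) ≤ 1 := by
              split <;> omega
            simp only [List.length_append] at hlen ⊢
            omega
          have hrec := ih _ hmlt d xs (front2 ++ A) (visited ++ [x]) (seen ++ A)
            hnd2 hsub2 (le_refl _)
          have hq : (List.map (fun x => (x, d)) xs ++ List.map (fun x => (x, d + 1)) front2)
              ++ List.map (fun n => (n, d + 1)) A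
              = List.map (fun x => (x, d)) xs ++ List.map (fun x => (x, d + 1)) (front2 ++ A) := by
            simp [List.map_append, List.append_assoc]
          dsimp only
          rw [hq]
          exact hrec
        · have hd2 : d ≥ md := not_lt.mp hd
          simp only [pvInnerB, if_pos hv, if_pos hd2, if_neg hv', if_neg hd]
          have hmlt : 2 * (2 * (base.length + 1 - seen.length) + xs.length + front2.length)
              + (if xs = [] then 1 else 0) < n := by
            have h0 : (if xs = ([] : List String) then (1 : Nat) else 0) ≤ 1 := by
              split <;> omega
            omega
          exact ih _ hmlt d xs front2 (visited ++ [x]) seen hnd hsub (le_refl _)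
      · have hv' : PySem.List.len visited ≥ ma := not_lt.mp hv
        simp only [pvInnerB, if_pos hv', if_neg hv]
        rw [pvOuterB, dif_pos hInv]
        rw [if_neg (fun hcc => hv hcc.2)]

-- ===== VERDICT (by name: the statement is the Claim_ definition above) =====
theorem expand_recommendation_graph_spec : Claim_equal_expand_recommendation_graph := by
  unfold Claim_equal_expand_recommendation_graph
  intro seed graph ma md _
  unfold Spec_expand_recommendation_graph
  unfold expand_recommendation_graph expand_recommendation_graph_alt
  set base := seed :: graph.flatMap (fun p => p.2) with hbase
  have hb : graph.flatMap (fun p => p.2) ⊆ base := List.subset_cons_self _ _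
  have hseed : PySem.Set.ofList [seed] = [seed] := rfl
  rw [hseed]
  have hnd : ([seed] : List String).Nodup := by simp
  have hsub : ([seed] : List String) ⊆ base := by
    intro y hy; simp at hy; subst hy; exact List.mem_cons_self
  have hsim := pvSim graph ma md base hb
    (2 * (2 * (base.length + 1 - 1) + 1 + 0) + 0) 0 [seed] [] [] [seed]
    hnd hsub (by simp)
  simp only [List.map_cons, List.map_nil, List.append_nil] at hsim
  rw [hsim]
  -- now unfold B's outer loop once on the right-hand side
  have hInv : ([seed] : List String).Nodup ∧ ([seed] : List String) ⊆ base
      ∧ List.flatMap (fun p => p.2) graph ⊆ base := ⟨hnd, hsub, hb⟩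
  conv_rhs => rw [pvOuterB]
  rw [dif_pos hInv]
  by_cases hma : PySem.List.len ([] : List String) < ma
  · rw [if_pos ⟨by simp, hma⟩]
  · rw [if_neg (fun hcc => hma hcc.2)]
    have hv' : PySem.List.len ([] : List String) ≥ ma := not_lt.mp hma
    simp only [pvInnerB, if_pos hv']
    rw [pvOuterB, dif_pos hInv]
    rw [if_neg (fun hcc => hcc.1 rfl)]
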